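-- pv_equiv track=rewrite | github.com/domingogallardo/docflow | utils/standalone_download_liked_tweets.py | _split_image_urls
-- ===== SOURCE A (Python) =====
-- from typing import List, Optional, Set, Tuple
--
-- def _split_image_urls(image_urls: List[str]) -> Tuple[Optional[str], List[str]]:
--     avatar = None
--     media: List[str] = []
--     for url in image_urls:
--         if avatar is None and "profile_images" in url:
--             avatar = url
--             continue
--         media.append(url)
--     return avatar, media
-- ===== SOURCE B (Python) =====
-- from typing import List, Optional, Tuple
--
-- def _split_image_urls(image_urls: List[str]) -> Tuple[Optional[str], List[str]]:
--     # Locate the avatar first, then drop exactly that one position in a second pass.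
--     idx, avatar = next(
--         ((i, u) for i, u in enumerate(image_urls) if "profile_images" in u),
--         (None, None),
--     )
--     media = [u for i, u in enumerate(image_urls) if i != idx]
--     return avatar, media
-- ===== Notes on version B (the rewrite author's own statement) =====
-- stated objective: alternative
-- what changed: Replaced the single stateful pass with an avatar-is-None flag by a locate-then-filter decomposition: one pass finds the first 'profile_images' index, a second pass keeps every other element.
import Mathlib
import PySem

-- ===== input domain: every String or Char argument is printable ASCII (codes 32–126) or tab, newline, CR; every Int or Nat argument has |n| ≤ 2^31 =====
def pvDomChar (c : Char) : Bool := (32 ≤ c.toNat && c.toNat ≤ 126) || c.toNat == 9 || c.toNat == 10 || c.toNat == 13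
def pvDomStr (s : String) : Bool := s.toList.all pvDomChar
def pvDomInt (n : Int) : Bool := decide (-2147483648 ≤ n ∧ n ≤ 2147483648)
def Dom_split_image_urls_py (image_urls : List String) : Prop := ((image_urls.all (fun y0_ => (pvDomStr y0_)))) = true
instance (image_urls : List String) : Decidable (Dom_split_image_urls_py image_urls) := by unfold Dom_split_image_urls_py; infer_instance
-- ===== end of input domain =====

-- B replaces A's single stateful flag-pass by a locate-then-filter decomposition (same cost).


-- ===== PORT A =====
def split_image_urls_py (image_urls : List String) : Option String × List String :=
  image_urls.foldl
    (fun st url =>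
      if st.1 = none ∧ PySem.Str.isIn "profile_images" url = true then (some url, st.2)
      else (st.1, st.2 ++ [url]))
    (none, [])

-- ===== PORT B =====
def split_image_urls_py_alt (image_urls : List String) : Option String × List String :=
  let hit := (PySem.List.enumerate image_urls).find? (fun p => PySem.Str.isIn "profile_images" p.2)
  let idx : Option Int := hit.map (·.1)
  let avatar : Option String := hit.map (·.2)
  let media := ((PySem.List.enumerate image_urls).filter (fun p => decide (idx ≠ some p.1))).map (·.2)
  (avatar, media)

-- ===== PRECONDITION & SPEC =====
def Spec_split_image_urls_py (image_urls : List String) (out : Option String × List String) : Prop := out = split_image_urls_py_alt image_urls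
instance (image_urls : List String) (out : Option String × List String) : Decidable (Spec_split_image_urls_py image_urls out) := by unfold Spec_split_image_urls_py; infer_instance

-- ===== CLAIM (what is proved, stated in full; the proofs are below) =====
def Claim_equal_split_image_urls_py : Prop := ∀ (image_urls : List String), Dom_split_image_urls_py image_urls → Spec_split_image_urls_py image_urls (split_image_urls_py image_urls)

-- ===== LEMMAS AND PROOFS =====

-- The common structural description of the result: first hit becomes the avatar, the rest is media in order.
def pvGo : List String → Option String × List String
  | [] => (none, [])
  | u :: t =>
    if PySem.Str.isIn "profile_images" u = true then (some u, t)
    else ((pvGo t).1, u :: (pvGo t).2)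

theorem pvFoldA_some (xs : List String) (a : String) (acc : List String) :
    xs.foldl
      (fun st url =>
        if st.1 = none ∧ PySem.Str.isIn "profile_images" url = true then (some url, st.2)
        else (st.1, st.2 ++ [url]))
      (some a, acc) = (some a, acc ++ xs) := by
  induction xs generalizing acc with
  | nil => simp
  | cons u t ih =>
    rw [List.foldl_cons, if_neg (by simp), ih]
    simp

theorem pvFoldA_none (xs : List String) (acc : List String) :
    xs.foldl
      (fun st url =>
        if st.1 = none ∧ PySem.Str.isIn "profile_images" url = true then (some url, st.2)
        else (st.1, st.2 ++ [url]))
      (none, acc) = ((pvGo xs).1, acc ++ (pvGo xs).2) := by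
  induction xs generalizing acc with
  | nil => simp [pvGo]
  | cons u t ih =>
    rw [List.foldl_cons]
    by_cases h : PySem.Str.isIn "profile_images" u = true
    · rw [if_pos ⟨rfl, h⟩, pvFoldA_some]
      simp only [pvGo, if_pos h]
    · rw [if_neg (fun hc => h hc.2), ih]
      simp only [pvGo, if_neg h]
      simp

theorem pvA_eq_go (xs : List String) : split_image_urls_py xs = pvGo xs := by
  unfold split_image_urls_py
  rw [pvFoldA_none]
  simp

theorem pvEnum_idx_ge (t : List String) (s : Int) (p : Int × String)
    (hp : p ∈ PySem.List.enumerate t s) : s ≤ p.1 := by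
  rw [PySem.List.mem_enumerate_iff] at hp
  obtain ⟨k, hk, rfl⟩ := hp
  simp

theorem pvB_eq_go (xs : List String) (s : Int) :
    (((((PySem.List.enumerate xs s).find? (fun p => PySem.Str.isIn "profile_images" p.2)).map (·.2)) : Option String),
     ((PySem.List.enumerate xs s).filter
        (fun p => decide ((((PySem.List.enumerate xs s).find? (fun q => PySem.Str.isIn "profile_images" q.2)).map (·.1)) ≠ some p.1))).map (·.2))
      = pvGo xs := by
  induction xs generalizing s with
  | nil => simp [PySem.List.enumerate_nil, pvGo]
  | cons u t ih =>
    rw [PySem.List.enumerate_cons]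
    by_cases h : PySem.Str.isIn "profile_images" u = true
    · -- hit is (s, u); the filter drops it and keeps the whole tail (its indices exceed s)
      have hfind : ((s, u) :: PySem.List.enumerate t (s + 1)).find?
          (fun p => PySem.Str.isIn "profile_images" p.2) = some (s, u) :=
        List.find?_cons_of_pos (p := fun p : Int × String => PySem.Str.isIn "profile_images" p.2) h
      rw [hfind]
      rw [List.filter_cons_of_neg (by simp)]
      simp only [Option.map_some, ne_eq, decide_not]
      have hkeep : (PySem.List.enumerate t (s + 1)).filter
          (fun p => !decide ((some s : Option Int) = some p.1)) = PySem.List.enumerate t (s + 1) := by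
        apply List.filter_eq_self.mpr
        intro p hp
        have := pvEnum_idx_ge t (s + 1) p hp
        simp
        omega
      rw [hkeep, PySem.List.map_snd_enumerate]
      simp only [pvGo, if_pos h]
    · have hfind : ((s, u) :: PySem.List.enumerate t (s + 1)).find?
          (fun p => PySem.Str.isIn "profile_images" p.2) =
          (PySem.List.enumerate t (s + 1)).find? (fun p => PySem.Str.isIn "profile_images" p.2) :=
        List.find?_cons_of_neg (p := fun p : Int × String => PySem.Str.isIn "profile_images" p.2) h
      rw [hfind]
      have iht := ih (s + 1)
      cases hF : (PySem.List.enumerate t (s + 1)).find? (fun p => PySem.Str.isIn "profile_images" p.2) with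
      | none =>
        rw [hF] at iht
        rw [List.filter_cons_of_pos (by simp)]
        simp only [pvGo, if_neg h, List.map_cons]
        rw [Prod.mk.injEq]
        exact ⟨congrArg Prod.fst iht, congrArg (u :: ·) (congrArg Prod.snd iht)⟩
      | some q =>
        have hq : s + 1 ≤ q.1 := pvEnum_idx_ge t (s + 1) q (List.mem_of_find?_eq_some hF)
        rw [hF] at iht
        rw [List.filter_cons_of_pos (by simp; omega)]
        simp only [pvGo, if_neg h, List.map_cons]
        rw [Prod.mk.injEq]
        exact ⟨congrArg Prod.fst iht, congrArg (u :: ·) (congrArg Prod.snd iht)⟩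

theorem pvB_spec (xs : List String) : split_image_urls_py_alt xs = pvGo xs := by
  unfold split_image_urls_py_alt
  exact pvB_eq_go xs 0

-- ===== VERDICT (by name: the statement is the Claim_ definition above) =====
theorem split_image_urls_py_spec : Claim_equal_split_image_urls_py := by
  intro xs _
  unfold Spec_split_image_urls_py
  rw [pvA_eq_go, pvB_spec]
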